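-- pv_equiv track=rewrite | github.com/rushiamrute/Sytem-log-Analyzer | main.py | analyze_logs
-- ===== SOURCE A (Python) =====
-- def analyze_logs(logs):
--     suspicious_keywords = [
--         'error', 'failed', 'denied', 'unauthorized', 'malicious',
--         'attack', 'refused', 'critical', 'crash', 'unexpected', 'shutdown'
--     ]
--     suspicious_logs = []
--     for log in logs:
--         if any(keyword in log.lower() for keyword in suspicious_keywords):
--             suspicious_logs.append(log)
--     return suspicious_logs
-- ===== SOURCE B (Python) =====
-- KEYWORDS = (
--     'error', 'failed', 'denied', 'unauthorized', 'malicious',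
--     'attack', 'refused', 'critical', 'crash', 'unexpected', 'shutdown'
-- )
--
-- def _suspicious(low):
--     # position-major scan: walk the lowered text once, testing each start position
--     for i in range(len(low)):
--         for kw in KEYWORDS:
--             if low.startswith(kw, i):
--                 return True
--     return False
--
-- def analyze_logs(logs):
--     return [log for log in logs if _suspicious(log.lower())]
-- ===== Notes on version B (the rewrite author's own statement) =====
-- stated objective: alternative
-- what changed: B replaces A's keyword-major loop (one substring search per keyword per log) with a position-major scan of each lowered log: it walks the text once and tests, at every start position, whether any keyword begins there, short-circuiting on the first hit; the result list is built by a comprehension over a predicate helper instead of an accumulator loop.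
import Mathlib
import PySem

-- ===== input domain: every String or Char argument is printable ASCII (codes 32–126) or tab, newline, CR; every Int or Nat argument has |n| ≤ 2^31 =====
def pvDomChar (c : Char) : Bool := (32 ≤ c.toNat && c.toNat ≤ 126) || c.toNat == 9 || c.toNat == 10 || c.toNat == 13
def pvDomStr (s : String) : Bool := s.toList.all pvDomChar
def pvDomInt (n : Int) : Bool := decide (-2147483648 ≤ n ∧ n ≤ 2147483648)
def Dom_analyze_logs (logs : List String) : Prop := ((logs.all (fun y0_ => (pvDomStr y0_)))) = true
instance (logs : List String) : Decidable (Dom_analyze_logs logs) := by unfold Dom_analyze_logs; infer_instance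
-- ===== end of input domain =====

-- B replaces A's keyword-major per-log substring loop with a position-major scan of the
-- lowered log (test every start position for any keyword prefix); alternative, not faster.


-- ===== PORT A =====
def suspiciousKeywordsA : List String :=
  ["error", "failed", "denied", "unauthorized", "malicious",
   "attack", "refused", "critical", "crash", "unexpected", "shutdown"]

def analyze_logs (logs : List String) : List String :=
  logs.foldl
    (fun suspicious_logs log =>
      if suspiciousKeywordsA.any (fun keyword => PySem.Str.isIn keyword (PySem.Str.lower log)) then
        suspicious_logs ++ [log]
      else suspicious_logs)
    []

-- ===== PORT B =====
def keywordsB : List (List Char) :=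
  ["error".toList, "failed".toList, "denied".toList, "unauthorized".toList, "malicious".toList,
   "attack".toList, "refused".toList, "critical".toList, "crash".toList, "unexpected".toList,
   "shutdown".toList]

-- _suspicious: for i in range(len(low)): for kw in KEYWORDS: if low.startswith(kw, i): return True
def suspiciousB (low : List Char) : Bool :=
  (List.range low.length).any fun i =>
    keywordsB.any fun kw => PySem.Chars.startswith (low.drop i) kw

def analyze_logs_alt (logs : List String) : List String :=
  logs.filter fun log => suspiciousB (PySem.Chars.lower log.toList)

-- ===== PRECONDITION & SPEC =====
def Spec_analyze_logs (logs : List String) (out : List String) : Prop := out = analyze_logs_alt logs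
instance (logs : List String) (out : List String) : Decidable (Spec_analyze_logs logs out) := by unfold Spec_analyze_logs; infer_instance

-- ===== CLAIM (what is proved, stated in full; the proofs are below) =====
def Claim_equal_analyze_logs : Prop := ∀ (logs : List String), Dom_analyze_logs logs → Spec_analyze_logs logs (analyze_logs logs)

-- ===== LEMMAS AND PROOFS =====

-- 'kw in low' = 'some position of low starts with kw', for nonempty kw
theorem isIn_eq_any_startswith (kw low : List Char) (hkw : kw ≠ []) :
    PySem.Chars.isIn kw low
      = (List.range low.length).any (fun i => PySem.Chars.startswith (low.drop i) kw) := by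
  rw [Bool.eq_iff_iff, List.any_eq_true,
      ← PySem.Chars.exists_prefix_drop_iff_isIn kw low]
  constructor
  · rintro ⟨j, hj⟩
    have hjlen : j < low.length := by
      by_contra hge
      have : low.drop j = [] := List.drop_eq_nil_of_le (by omega)
      rw [this, List.prefix_nil] at hj
      exact hkw hj
    exact ⟨j, List.mem_range.mpr hjlen, (PySem.Chars.startswith_iff _ _).mpr hj⟩
  · rintro ⟨i, _, hst⟩
    exact ⟨i, (PySem.Chars.startswith_iff _ _).mp hst⟩

theorem keywordsB_ne_nil : ∀ kw ∈ keywordsB, kw ≠ [] := by decide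

-- the per-log tests of the two ports agree
theorem cond_eq (log : String) :
    suspiciousKeywordsA.any (fun keyword => PySem.Str.isIn keyword (PySem.Str.lower log))
      = suspiciousB (PySem.Chars.lower log.toList) := by
  unfold suspiciousB
  set low := PySem.Chars.lower log.toList with hlow
  have hA : suspiciousKeywordsA.any (fun keyword => PySem.Str.isIn keyword (PySem.Str.lower log))
      = keywordsB.any (fun kw => PySem.Chars.isIn kw low) := by
    simp [suspiciousKeywordsA, keywordsB, hlow, PySem.Str.isIn]
  rw [hA, Bool.eq_iff_iff, List.any_eq_true, List.any_eq_true]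
  constructor
  · rintro ⟨kw, hkw, h⟩
    rw [isIn_eq_any_startswith kw low (keywordsB_ne_nil kw hkw), List.any_eq_true] at h
    obtain ⟨i, hi, hst⟩ := h
    exact ⟨i, hi, List.any_eq_true.mpr ⟨kw, hkw, hst⟩⟩
  · rintro ⟨i, hi, h⟩
    obtain ⟨kw, hkw, hst⟩ := List.any_eq_true.mp h
    refine ⟨kw, hkw, ?_⟩
    rw [isIn_eq_any_startswith kw low (keywordsB_ne_nil kw hkw), List.any_eq_true]
    exact ⟨i, hi, hst⟩

-- ===== VERDICT (by name: the statement is the Claim_ definition above) =====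
theorem analyze_logs_spec : Claim_equal_analyze_logs := by
  intro logs _
  unfold Spec_analyze_logs analyze_logs analyze_logs_alt
  rw [PySem.List.foldl_append_if_eq_filter, List.nil_append]
  exact List.filter_congr fun log _ => cond_eq log
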